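-- pv_equiv track=rewrite | github.com/Abhi-trigo/Python-Programs | tcs ninga 2020.py | count
-- ===== SOURCE A (Python) =====
-- def count(step):
--     x=y=0
--     move=0
--     l=[]
--     while(step!=0):
--         temp=step%4
--         move+=10
--         if(temp==0):
--             x+=move
--         elif(temp==1):
--             y+=move
--         elif(temp==2):
--             x-=move
--         else:
--             y-=move
--         step-=1
--     l.append(x)
--     l.append(y)
--     return l
-- ===== SOURCE B (Python) =====
-- def count(step):
--     # Closed form: iteration i (1-based) handles value v = step - i + 1 and adds
--     # move = 10*i with sign/axis chosen by v % 4.  Summing the arithmetic series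
--     # over each residue class r gives the answer in O(1).
--     def class_sum(r):
--         # sum of i = step - v + 1 over v = r, r+4, r+8, ... <= step
--         if r > step:
--             return 0
--         k = (step - r) // 4 + 1
--         return k * (step + 1) - k * r - 2 * k * (k - 1)
--     x = 10 * (class_sum(4) - class_sum(2))
--     y = 10 * (class_sum(1) - class_sum(3))
--     return [x, y]
-- ===== Notes on version B (the rewrite author's own statement) =====
-- stated objective: faster
-- what changed: Replaced A's per-step while-loop with an O(1) closed form: for each residue class (modulo four) of the moved value, the sum of the arithmetic series of move increments is computed directly.
import Mathlib
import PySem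

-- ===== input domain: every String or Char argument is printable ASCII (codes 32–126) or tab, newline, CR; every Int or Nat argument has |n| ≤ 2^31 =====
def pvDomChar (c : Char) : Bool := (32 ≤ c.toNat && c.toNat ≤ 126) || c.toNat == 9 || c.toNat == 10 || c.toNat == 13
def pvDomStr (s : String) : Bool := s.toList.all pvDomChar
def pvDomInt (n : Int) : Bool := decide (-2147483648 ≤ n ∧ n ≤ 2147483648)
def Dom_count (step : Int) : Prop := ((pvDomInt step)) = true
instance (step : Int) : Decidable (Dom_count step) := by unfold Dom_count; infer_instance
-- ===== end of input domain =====

-- B replaces A's step-by-step walk with a closed form: the signed arithmetic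
-- series of move increments, summed per residue class of the moved value modulo four.


-- ===== PORT A =====
-- A's while-loop; fuel = step.toNat (under Pre_count, step ≥ 0, the loop runs exactly that often)
def countGo : Nat → Int → Int → Int → Int → Int × Int
  | 0, _, x, y, _ => (x, y)
  | n + 1, step, x, y, move =>
    if step = 0 then (x, y)
    else
      let temp := PySem.Int.mod step 4
      let move := move + 10
      if temp = 0 then countGo n (step - 1) (x + move) y move
      else if temp = 1 then countGo n (step - 1) x (y + move) move
      else if temp = 2 then countGo n (step - 1) (x - move) y move
      else countGo n (step - 1) x (y - move) move

def count (step : Int) : List Int :=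
  let p := countGo step.toNat step 0 0 0
  [p.1, p.2]

-- ===== PORT B =====
-- sum of the 1-based iteration indices i = step - v + 1 over the values v ≡ r (mod 4), 1 ≤ v ≤ step
def classSum (step r : Int) : Int :=
  if r > step then 0
  else
    let k := PySem.Int.floordiv (step - r) 4 + 1
    k * (step + 1) - k * r - 2 * k * (k - 1)

def count_alt (step : Int) : List Int :=
  [10 * (classSum step 4 - classSum step 2), 10 * (classSum step 1 - classSum step 3)]

-- ===== PRECONDITION & SPEC =====
-- Pre_ excludes negative step, on which A's while-loop never terminates (step -= 1 moves away from 0)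
def Pre_count (step : Int) : Prop := 0 ≤ step
instance (step : Int) : Decidable (Pre_count step) := by unfold Pre_count; infer_instance
def pvWitness_count : Int := 7

def Spec_count (step : Int) (out : List Int) : Prop := out = count_alt step
instance (step : Int) (out : List Int) : Decidable (Spec_count step out) := by unfold Spec_count; infer_instance

-- ===== CLAIM (what is proved, stated in full; the proofs are below) =====
def Claim_equal_count : Prop := ∀ (step : Int), Dom_count step → Pre_count step → Spec_count step (count step)

-- ===== LEMMAS AND PROOFS =====

-- Kc r n = how many v in 1..n have v % 4 = r
def Kc (r : Nat) : Nat → Int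
  | 0 => 0
  | n + 1 => Kc r n + (if (n + 1) % 4 = r then 1 else 0)

-- Sc r n = sum of (n - v + 1) over v in 1..n with v % 4 = r
def Sc (r : Nat) : Nat → Int
  | 0 => 0
  | n + 1 => Sc r n + Kc r (n + 1)

-- loop invariant: A's loop computes the signed per-class sums
theorem countGo_eq (n : Nat) : ∀ (x y move : Int),
    countGo n (n : Int) x y move =
      (x + move * (Kc 0 n - Kc 2 n) + 10 * (Sc 0 n - Sc 2 n),
       y + move * (Kc 1 n - Kc 3 n) + 10 * (Sc 1 n - Sc 3 n)) := by
  induction n with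
  | zero => intro x y move; simp [countGo, Kc, Sc]
  | succ n ih =>
    intro x y move
    have hne : ((n + 1 : Nat) : Int) ≠ 0 := by omega
    have hmod : PySem.Int.mod ((n + 1 : Nat) : Int) 4 = (((n + 1) % 4 : Nat) : Int) := by
      exact_mod_cast PySem.Int.mod_natCast (n + 1) 4
    have hstep : ((n + 1 : Nat) : Int) - 1 = (n : Int) := by push_cast; ring
    have h4 : (n + 1) % 4 = 0 ∨ (n + 1) % 4 = 1 ∨ (n + 1) % 4 = 2 ∨ (n + 1) % 4 = 3 := by omega
    rcases h4 with hc | hc | hc | hc <;>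
      · simp only [countGo, hne, if_false, hmod, hc, hstep, ih, Kc, Sc]
        norm_num
        constructor <;> ring

theorem Kc_closed (r : Nat) (h1 : 1 ≤ r) (h4 : r ≤ 4) (n : Nat) :
    Kc (r % 4) n = ((n + 4 - r) / 4 : Nat) := by
  induction n with
  | zero => simp [Kc]; omega
  | succ n ih =>
    simp only [Kc, ih]
    split_ifs with h <;> omega

-- B's closed form equals the recursive per-class sum
theorem classSum_eq (r : Nat) (h1 : 1 ≤ r) (h4 : r ≤ 4) : ∀ (n : Nat),
    classSum (n : Int) (r : Int) = Sc (r % 4) n := by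
  intro n
  induction n with
  | zero =>
    simp only [Sc, classSum, Nat.cast_zero]
    rw [if_pos (by exact_mod_cast h1)]
  | succ n ih =>
    have hK := Kc_closed r h1 h4 (n + 1)
    rw [Sc, hK, ← ih]
    by_cases hr : r ≤ n + 1
    · have hc : ¬ ((r : Int) > ((n + 1 : Nat) : Int)) := by omega
      rw [classSum, if_neg hc]
      have hsub : ((n + 1 : Nat) : Int) - (r : Int) = ((n + 1 - r : Nat) : Int) := by omega
      rw [hsub]
      have hfd : PySem.Int.floordiv ((n + 1 - r : Nat) : Int) 4 = (((n + 1 - r) / 4 : Nat) : Int) := by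
        exact_mod_cast PySem.Int.floordiv_natCast (n + 1 - r) 4
      rw [hfd]
      by_cases hrn : r ≤ n
      · have hcn : ¬ ((r : Int) > ((n : Nat) : Int)) := by omega
        rw [classSum, if_neg hcn]
        have hsubn : ((n : Nat) : Int) - (r : Int) = ((n - r : Nat) : Int) := by omega
        rw [hsubn]
        have hfdn : PySem.Int.floordiv ((n - r : Nat) : Int) 4 = (((n - r) / 4 : Nat) : Int) := by
          exact_mod_cast PySem.Int.floordiv_natCast (n - r) 4
        rw [hfdn]
        set a : Nat := (n + 1 - r) / 4 with ha
        set b : Nat := (n - r) / 4 with hb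
        have h3 : ((n + 1 + 4 - r) / 4 : Nat) = a + 1 := by omega
        rw [h3]
        by_cases hd : (n + 1) % 4 = r % 4
        · have hA : (a : Int) = (b : Int) + 1 := by
            have : a = b + 1 := by omega
            exact_mod_cast this
          have h2 : 4 * ((b : Int) + 1) = (n : Int) + 1 - r := by omega
          push_cast
          rw [hA]
          linear_combination -h2
        · have hA : (a : Int) = (b : Int) := by
            have : a = b := by omega
            exact_mod_cast this
          push_cast
          rw [hA]
          ring
      · have hre : r = n + 1 := by omega
        have hcn : (r : Int) > ((n : Nat) : Int) := by omega
        rw [classSum, if_pos hcn]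
        have ha0 : (n + 1 - r) / 4 = 0 := by omega
        have h3 : ((n + 1 + 4 - r) / 4 : Nat) = 1 := by omega
        rw [ha0, h3]
        push_cast [hre]
        ring
    · have hc : (r : Int) > ((n + 1 : Nat) : Int) := by omega
      have hcn : (r : Int) > ((n : Nat) : Int) := by omega
      rw [classSum, if_pos hc, classSum, if_pos hcn]
      have h0 : ((n + 1 + 4 - r) / 4 : Nat) = 0 := by omega
      rw [h0]
      simp

-- ===== VERDICT (by name: the statement is the Claim_ definition above) =====
theorem count_spec : Claim_equal_count := by
  intro step _ hpre
  unfold Spec_count count count_alt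
  obtain ⟨n, rfl⟩ : ∃ n : Nat, step = (n : Int) := ⟨step.toNat, (Int.toNat_of_nonneg hpre).symm⟩
  have h1 : classSum (n : Int) 1 = Sc 1 n := by exact_mod_cast classSum_eq 1 (by omega) (by omega) n
  have h2 : classSum (n : Int) 2 = Sc 2 n := by exact_mod_cast classSum_eq 2 (by omega) (by omega) n
  have h3 : classSum (n : Int) 3 = Sc 3 n := by exact_mod_cast classSum_eq 3 (by omega) (by omega) n
  have h4 : classSum (n : Int) 4 = Sc 0 n := by
    have := classSum_eq 4 (by omega) (by omega) n
    norm_num at this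
    exact_mod_cast this
  simp only [Int.toNat_natCast, countGo_eq, h1, h2, h3, h4]
  norm_num
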